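-- pv_equiv track=rewrite | github.com/ucsb-cs8-f18/cs8-f18-lecture-code | lec13/midterm2.py | indexOfSmallestOdd_a
-- ===== SOURCE A (Python) =====
-- def indexOfSmallestOdd_a(alist):
--     if type(alist)!=list:
--         return False
--     if alist==[]:
--         return False
--
--     soFar = 0
--     for i in range(0,len(alist)):
--         if type(alist[i])!=int:
--             return False
--         if alist[i] %2 == 1:
--             soFar = i
--     return soFar
-- ===== SOURCE B (Python) =====
-- def indexOfSmallestOdd_a(alist):
--     if type(alist) != list:
--         return False
--     if not alist:
--         return False
--     if any(type(x) != int for x in alist):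
--         return False
--     # search backwards: the first odd element seen from the right is the answer
--     for i in range(len(alist) - 1, -1, -1):
--         if alist[i] % 2 == 1:
--             return i
--     return 0
-- ===== Notes on version B (the rewrite author's own statement) =====
-- stated objective: alternative
-- what changed: Replaces A's forward loop that overwrites a running last-odd index with a backward scan that early-returns the first odd index seen from the right (after a separate any() validation pass).
-- outside the precondition, e.g. on indexOfSmallestOdd_a([]): A returns False, B returns False
import Mathlib
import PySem

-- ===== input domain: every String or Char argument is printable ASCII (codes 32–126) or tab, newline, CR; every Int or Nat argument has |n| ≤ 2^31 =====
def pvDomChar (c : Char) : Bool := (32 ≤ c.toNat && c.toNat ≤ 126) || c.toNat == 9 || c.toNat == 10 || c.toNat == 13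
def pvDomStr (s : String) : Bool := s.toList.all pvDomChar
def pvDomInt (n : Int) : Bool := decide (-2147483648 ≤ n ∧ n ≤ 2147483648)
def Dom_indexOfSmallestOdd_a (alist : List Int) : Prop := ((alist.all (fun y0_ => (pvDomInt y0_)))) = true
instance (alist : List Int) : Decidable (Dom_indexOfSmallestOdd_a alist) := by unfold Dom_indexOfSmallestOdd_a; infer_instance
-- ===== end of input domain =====

-- B scans backwards and early-returns the first odd index seen from the right (A scans forward overwriting a running index); same value, different traversal.

-- ===== PORT A =====
-- The `type(alist)!=list` and `type(alist[i])!=int` guards cannot fire for a `List Int`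
-- argument, so they vanish; `alist==[]` (return False, a bool) is excluded by Pre_.
-- The loop over range(0, len(alist)) with running soFar, exact: indices are in range,
-- so pyGetD alist i 0 equals Python's alist[i].
def indexOfSmallestOdd_a (alist : List Int) : Int :=
  (PySem.List.pyRange 0 (alist.length : Int) 1).foldl
    (fun soFar i =>
      if PySem.Int.mod (PySem.List.pyGetD alist i 0) 2 = 1 then i else soFar) 0

-- ===== PORT B =====
-- the any() validation pass cannot fire for List Int; the backward early-return loop
-- `for i in range(len-1, -1, -1): if alist[i]%2==1: return i` is find? over the
-- countdown range (first hit = Python's early return), `return 0` is the none case.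
def indexOfSmallestOdd_a_alt (alist : List Int) : Int :=
  match (PySem.List.pyRange ((alist.length : Int) - 1) (-1) (-1)).find?
      (fun i => PySem.Int.mod (PySem.List.pyGetD alist i 0) 2 == 1) with
  | some i => i
  | none => 0

-- ===== PRECONDITION & SPEC =====
-- Pre_ excludes the empty list, on which Python A returns False (a bool, not an int of the declared return type).
def Pre_indexOfSmallestOdd_a (alist : List Int) : Prop := alist ≠ []
instance (alist : List Int) : Decidable (Pre_indexOfSmallestOdd_a alist) := by
  unfold Pre_indexOfSmallestOdd_a; infer_instance
def pvWitness_indexOfSmallestOdd_a : List Int := [2, 3, 4]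
def Spec_indexOfSmallestOdd_a (alist : List Int) (out : Int) : Prop := out = indexOfSmallestOdd_a_alt alist
instance (alist : List Int) (out : Int) : Decidable (Spec_indexOfSmallestOdd_a alist out) := by unfold Spec_indexOfSmallestOdd_a; infer_instance

-- ===== CLAIM =====
def Claim_equal_indexOfSmallestOdd_a : Prop := ∀ (alist : List Int), Dom_indexOfSmallestOdd_a alist → Pre_indexOfSmallestOdd_a alist → Spec_indexOfSmallestOdd_a alist (indexOfSmallestOdd_a alist)

-- ===== LEMMAS AND PROOFS =====

-- find? only looks at elements of the list, so equal-on-members predicates agree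
theorem pv_find?_congr_mem {α : Type} (l : List α) (p q : α → Bool)
    (h : ∀ x ∈ l, p x = q x) : l.find? p = l.find? q := by
  induction l with
  | nil => rfl
  | cons a t ih =>
      simp only [List.find?_cons]
      rw [h a (by simp)]
      cases q a
      · exact ih (fun x hx => h x (by simp [hx]))
      · rfl

-- main equality, total; proved by reverse induction on the list
theorem pv_main (alist : List Int) :
    indexOfSmallestOdd_a alist = indexOfSmallestOdd_a_alt alist := by
  induction alist using List.reverseRecOn with
  | nil => decide
  | append_singleton xs x ih =>
      unfold indexOfSmallestOdd_a indexOfSmallestOdd_a_alt at *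
      have hlen : ((xs ++ [x]).length : Int) = (xs.length : Int) + 1 := by simp
      have hget : PySem.List.pyGetD (xs ++ [x]) (xs.length : Int) 0 = x := by
        simp [PySem.List.pyGetD, PySem.List.pyGet?, PySem.List.pyIdx?]
      -- A side: split off the last loop iteration
      rw [hlen, PySem.List.pyRange_one_succ_right (by positivity), List.foldl_append]
      have hpreA :
          (PySem.List.pyRange 0 (xs.length : Int) 1).foldl
            (fun soFar i =>
              if PySem.Int.mod (PySem.List.pyGetD (xs ++ [x]) i 0) 2 = 1 then i else soFar) 0
          = (PySem.List.pyRange 0 (xs.length : Int) 1).foldl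
            (fun soFar i =>
              if PySem.Int.mod (PySem.List.pyGetD xs i 0) 2 = 1 then i else soFar) 0 := by
        apply PySem.List.foldl_congr_mem
        intro acc i hi
        have hmem := (PySem.List.mem_pyRange_one).mp hi
        rw [PySem.List.pyGetD_eq_getElem _ 0 hmem.1 (by simp; omega),
            PySem.List.pyGetD_eq_getElem _ 0 hmem.1 hmem.2,
            List.getElem_append_left]
      -- B side: the countdown range starts at xs.length
      have hcons : PySem.List.pyRange ((xs.length : Int) + 1 - 1) (-1) (-1)
          = (xs.length : Int) :: PySem.List.pyRange ((xs.length : Int) - 1) (-1) (-1) := by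
        have h : ((xs.length : Int) + 1 - 1) = (xs.length : Int) := by ring
        rw [h, PySem.List.pyRange_neg_one_cons (by omega)]
      have hpreB :
          (PySem.List.pyRange ((xs.length : Int) - 1) (-1) (-1)).find?
            (fun i => PySem.Int.mod (PySem.List.pyGetD (xs ++ [x]) i 0) 2 == 1)
          = (PySem.List.pyRange ((xs.length : Int) - 1) (-1) (-1)).find?
            (fun i => PySem.Int.mod (PySem.List.pyGetD xs i 0) 2 == 1) := by
        apply pv_find?_congr_mem
        intro i hi
        have hmem := (PySem.List.mem_pyRange_neg_one).mp hi
        have h0 : (0 : Int) ≤ i := by omega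
        rw [PySem.List.pyGetD_eq_getElem _ 0 h0 (by simp; omega),
            PySem.List.pyGetD_eq_getElem _ 0 h0 (by omega),
            List.getElem_append_left]
      rw [hcons, List.find?_cons]
      simp only [List.foldl_cons, List.foldl_nil]
      rw [hget]
      by_cases hodd : PySem.Int.mod x 2 = 1
      · rw [if_pos hodd, show (PySem.Int.mod x 2 == 1) = true by
          simp only [beq_iff_eq]; exact hodd]
      · rw [if_neg hodd, show (PySem.Int.mod x 2 == 1) = false by
          rw [beq_eq_false_iff_ne]; exact hodd, hpreA, ih, hpreB]

-- ===== VERDICT =====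
theorem indexOfSmallestOdd_a_spec : Claim_equal_indexOfSmallestOdd_a := by
  intro alist _ _
  unfold Spec_indexOfSmallestOdd_a
  exact pv_main alist
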